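-- pv_equiv track=rewrite | github.com/Zhongtian-Tang/Alpha | src/summary.py | getmonthindex
-- ===== SOURCE A (Python) =====
-- def getmonthindex(m, dates):
--     """Calculate the index of month in the date list.
--     """
--     starti = 0
--     endi = 0
--     for i in range(len(dates)):
--         month = dates[i] // 100
--         if month < m:
--             starti = i + 1
--         elif month == m:
--             endi = i
--         elif month > m:
--             break
--     return [starti, endi]
-- ===== SOURCE B (Python) =====
-- def getmonthindex(m, dates):
--     """Calculate the index of month in the date list."""
--     months = [d // 100 for d in dates]
--     # cut the scan at the first month greater than m (where the original loop breaks)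
--     k = next((i for i, mo in enumerate(months) if mo > m), len(months))
--     lt = [i for i in range(k) if months[i] < m]
--     eq = [i for i in range(k) if months[i] == m]
--     return [lt[-1] + 1 if lt else 0, eq[-1] if eq else 0]
-- ===== Notes on version B (the rewrite author's own statement) =====
-- stated objective: alternative
-- what changed: A's single stateful forward loop (mutating starti/endi with a break) is replaced by computing the break point k once, then deriving both answers declaratively from index comprehensions over the prefix and a last-element lookup.
import Mathlib
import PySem

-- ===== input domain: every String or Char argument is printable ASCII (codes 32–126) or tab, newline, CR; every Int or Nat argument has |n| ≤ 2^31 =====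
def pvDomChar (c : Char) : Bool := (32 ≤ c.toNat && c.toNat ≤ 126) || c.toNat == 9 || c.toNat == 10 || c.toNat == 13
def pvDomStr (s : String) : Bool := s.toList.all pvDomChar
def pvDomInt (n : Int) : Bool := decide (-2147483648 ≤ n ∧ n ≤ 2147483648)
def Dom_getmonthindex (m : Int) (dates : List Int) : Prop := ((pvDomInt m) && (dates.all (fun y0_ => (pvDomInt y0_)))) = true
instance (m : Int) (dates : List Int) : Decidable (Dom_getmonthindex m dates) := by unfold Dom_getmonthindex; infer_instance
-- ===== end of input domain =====

-- B replaces A's single stateful forward loop by a cut at the break point plus index comprehensions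
-- and a last-element lookup (objective: alternative decomposition, same O(n) cost).

-- ===== PORT A =====
-- A's for-loop over range(len(dates)) with state (starti, endi) and a break, as recursion
def goA (m : Int) : List Int → Int → Int → Int → List Int
  | [], _, s, e => [s, e]
  | d :: rest, i, s, e =>
    let month := PySem.Int.floordiv d 100
    if month < m then goA m rest (i + 1) (i + 1) e
    else if month = m then goA m rest (i + 1) s i
    else [s, e]

def getmonthindex (m : Int) (dates : List Int) : List Int := goA m dates 0 0 0

-- ===== PORT B =====
-- B's `next((i for i, mo in enumerate(months) if mo > m), len(months))`
def kOf (m : Int) : List Int → Nat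
  | [] => 0
  | mo :: rest => if mo > m then 0 else kOf m rest + 1

def getmonthindex_alt (m : Int) (dates : List Int) : List Int :=
  let months := dates.map (fun d => PySem.Int.floordiv d 100)
  let k := kOf m months
  let lt := (List.range k).filter (fun i => decide (months.getD i 0 < m))
  let eq := (List.range k).filter (fun i => months.getD i 0 == m)
  [ (match lt.getLast? with | some j => (j : Int) + 1 | none => 0),
    (match eq.getLast? with | some j => (j : Int) | none => 0) ]

-- ===== PRECONDITION & SPEC =====
def Spec_getmonthindex (m : Int) (dates : List Int) (out : List Int) : Prop := out = getmonthindex_alt m dates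
instance (m : Int) (dates : List Int) (out : List Int) : Decidable (Spec_getmonthindex m dates out) := by unfold Spec_getmonthindex; infer_instance

-- ===== CLAIM (what is proved, stated in full; the proofs are below) =====
def Claim_equal_getmonthindex : Prop := ∀ (m : Int) (dates : List Int), Dom_getmonthindex m dates → Spec_getmonthindex m dates (getmonthindex m dates)

-- ===== LEMMAS AND PROOFS =====

-- proof-only helper: the last index j of P with p (P[j])
def lastIdx (p : Int → Bool) : List Int → Option Nat
  | [] => none
  | mo :: rest =>
    match lastIdx p rest with
    | some j => some (j + 1)
    | none => if p mo then some 0 else none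

theorem kOf_le (m : Int) (L : List Int) : kOf m L ≤ L.length := by
  induction L with
  | nil => simp [kOf]
  | cons mo rest ih =>
    simp only [kOf, List.length_cons]
    split <;> omega

theorem lastIdx_range (p : Int → Bool) (P : List Int) :
    ((List.range P.length).filter (fun i => p (P.getD i 0))).getLast? = lastIdx p P := by
  induction P with
  | nil => simp [lastIdx]
  | cons mo rest ih =>
    rw [List.length_cons, List.range_succ_eq_map, List.filter_cons, List.filter_map]
    simp only [Function.comp_def, List.getD_cons_succ, List.getD_cons_zero, lastIdx]
    cases h : lastIdx p rest with
    | some j =>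
      have hne : (List.range rest.length).filter (fun i => p (rest.getD i 0)) ≠ [] := by
        intro hnil
        rw [hnil] at ih; rw [h] at ih; simp at ih
      obtain ⟨a, l, hal⟩ : ∃ a l, (List.range rest.length).filter (fun i => p (rest.getD i 0)) = a :: l := by
        cases hf : (List.range rest.length).filter (fun i => p (rest.getD i 0)) with
        | nil => exact absurd hf hne
        | cons a l => exact ⟨a, l, rfl⟩
      have hm2 : (((a :: l).map Nat.succ)).getLast? = some (j + 1) := by
        rw [List.getLast?_map, ← hal, ih, h]; rfl
      rw [hal, List.map_cons]
      split
      · rw [List.getLast?_cons_cons, ← List.map_cons, hm2]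
      · rw [← List.map_cons, hm2]
    | none =>
      have hf : (List.range rest.length).filter (fun i => p (rest.getD i 0)) = [] := by
        rw [h] at ih; exact List.getLast?_eq_none_iff.mp ih
      rw [hf]
      split <;> simp_all

theorem goA_spec (m : Int) (dates : List Int) (i s e : Int) :
    goA m dates i s e =
      [ (match lastIdx (fun x => decide (x < m)) ((dates.map (fun d => PySem.Int.floordiv d 100)).take (kOf m (dates.map (fun d => PySem.Int.floordiv d 100)))) with
          | some j => i + j + 1 | none => s),
        (match lastIdx (fun x => x == m) ((dates.map (fun d => PySem.Int.floordiv d 100)).take (kOf m (dates.map (fun d => PySem.Int.floordiv d 100)))) with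
          | some j => i + j | none => e) ] := by
  induction dates generalizing i s e with
  | nil => simp [goA, lastIdx]
  | cons d rest ih =>
    simp only [List.map_cons, goA]
    set month := PySem.Int.floordiv d 100 with hm
    set T := (rest.map (fun d => PySem.Int.floordiv d 100)).take (kOf m (rest.map (fun d => PySem.Int.floordiv d 100))) with hT
    by_cases hlt : month < m
    · have hgt : ¬ month > m := by omega
      have hne : ¬ month = m := by omega
      rw [if_pos hlt, ih]
      simp only [kOf, if_neg hgt, List.take_succ_cons, lastIdx, ← hT]
      cases h1 : lastIdx (fun x => decide (x < m)) T <;>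
        cases h2 : lastIdx (fun x => x == m) T <;>
          simp [h1, h2, hlt, hne] <;> (try ring_nf) <;> (try exact ⟨trivial, trivial⟩)
    · by_cases heq : month = m
      · have hgt : ¬ month > m := by omega
        rw [if_neg hlt, if_pos heq, ih]
        simp only [kOf, if_neg hgt, List.take_succ_cons, lastIdx, ← hT]
        cases h1 : lastIdx (fun x => decide (x < m)) T <;>
          cases h2 : lastIdx (fun x => x == m) T <;>
            simp [h1, h2, hlt, heq] <;> (try ring_nf) <;> (try exact ⟨trivial, trivial⟩)
      · have hgt : month > m := by omega
        rw [if_neg hlt, if_neg heq]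
        simp [kOf, hgt, lastIdx]

theorem filter_take (p : Int → Bool) (L : List Int) (k : Nat) (hk : k ≤ L.length) :
    (List.range k).filter (fun i => p (L.getD i 0))
      = (List.range (L.take k).length).filter (fun i => p ((L.take k).getD i 0)) := by
  rw [List.length_take, Nat.min_eq_left hk]
  apply List.filter_congr
  intro i hi
  have hik : i < k := List.mem_range.mp hi
  have : (L.take k).getD i 0 = L.getD i 0 := by
    simp [List.getD, hik]
  rw [this]

-- ===== VERDICT (by name: the statement is the Claim_ definition above) =====
theorem getmonthindex_spec : Claim_equal_getmonthindex := by
  intro m dates _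
  show getmonthindex m dates = getmonthindex_alt m dates
  unfold getmonthindex
  rw [goA_spec]
  set months := dates.map (fun d => PySem.Int.floordiv d 100) with hM
  have hk : kOf m months ≤ months.length := kOf_le m months
  have halt : getmonthindex_alt m dates =
      [ (match ((List.range (kOf m months)).filter (fun i => decide (months.getD i 0 < m))).getLast? with
          | some j => (j : Int) + 1 | none => 0),
        (match ((List.range (kOf m months)).filter (fun i => months.getD i 0 == m)).getLast? with
          | some j => (j : Int) | none => 0) ] := rfl
  rw [halt,
      filter_take (fun x => decide (x < m)) months _ hk,
      filter_take (fun x => x == m) months _ hk,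
      lastIdx_range (fun x => decide (x < m)), lastIdx_range (fun x => x == m)]
  cases lastIdx (fun x => decide (x < m)) (months.take (kOf m months)) <;>
    cases lastIdx (fun x => x == m) (months.take (kOf m months)) <;> simp
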